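-- pv_equiv track=rewrite | github.com/michael-hirschmugl/snes-terminal-bridge | snes/tools/gen_assets.py | _reconstruct_pixels_8x8
-- ===== SOURCE A (Python) =====
-- def _reconstruct_pixels_8x8(unique_tiles, placements, width, height):
--     out = [[0] * width for _ in range(height)]
--     for ty, row in enumerate(placements):
--         for tx, (idx, hf, vf) in enumerate(row):
--             tile = unique_tiles[idx]
--             if hf:
--                 tile = [list(reversed(r)) for r in tile]
--             if vf:
--                 tile = list(reversed(tile))
--             for y in range(8):
--                 for x in range(8):
--                     out[ty * 8 + y][tx * 8 + x] = tile[y][x]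
--     return out
-- ===== SOURCE B (Python) =====
-- def _reconstruct_pixels_8x8(unique_tiles, placements, width, height):
--     def pix(r, c):
--         ty, y = divmod(r, 8)
--         tx, x = divmod(c, 8)
--         if ty < len(placements):
--             row = placements[ty]
--             if tx < len(row):
--                 idx, hf, vf = row[tx]
--                 tile = unique_tiles[idx]
--                 return tile[7 - y if vf else y][7 - x if hf else x]
--         return 0
--     return [[pix(r, c) for c in range(width)] for r in range(height)]
-- ===== Notes on version B (the rewrite author's own statement) =====
-- stated objective: alternative
-- what changed: Replaces imperative tile-by-tile mutation (build flipped copies of each tile, then write 64 cells into a preallocated grid) with a pure per-pixel construction: each output cell is computed directly from its coordinates via divmod and a computed flip coordinate map, with no mutation and no intermediate flipped tiles.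
import Mathlib
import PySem

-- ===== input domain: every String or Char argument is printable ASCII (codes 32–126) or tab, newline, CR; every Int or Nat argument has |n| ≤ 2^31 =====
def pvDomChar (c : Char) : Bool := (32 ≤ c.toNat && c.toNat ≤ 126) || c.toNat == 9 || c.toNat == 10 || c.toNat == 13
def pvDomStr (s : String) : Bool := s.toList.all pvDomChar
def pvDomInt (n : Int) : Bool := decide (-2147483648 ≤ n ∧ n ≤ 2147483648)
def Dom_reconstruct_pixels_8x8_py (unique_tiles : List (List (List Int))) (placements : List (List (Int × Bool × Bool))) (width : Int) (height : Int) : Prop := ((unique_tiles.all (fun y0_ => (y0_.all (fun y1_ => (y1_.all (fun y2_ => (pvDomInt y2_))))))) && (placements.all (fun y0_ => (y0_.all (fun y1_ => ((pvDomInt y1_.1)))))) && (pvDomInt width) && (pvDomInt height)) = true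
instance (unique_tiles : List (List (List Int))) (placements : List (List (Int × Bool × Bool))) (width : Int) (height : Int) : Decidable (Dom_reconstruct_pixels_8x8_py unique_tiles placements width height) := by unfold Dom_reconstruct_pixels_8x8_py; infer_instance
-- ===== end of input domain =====

-- B replaces A's mutate-a-grid, flip-then-copy algorithm by a pure per-pixel construction
-- (each cell computed from its coordinates through a flip coordinate map); equivalence is
-- proved on inputs where A raises no IndexError and every referenced tile is exactly 8x8.

-- ===== PORT A =====
-- out[r][c] = v  (Python list assignment; indices are in range under Pre_, where List.set is exact)
def pvSetCell (out : List (List Int)) (r c : Nat) (v : Int) : List (List Int) :=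
  out.set r ((out.getD r []).set c v)

-- tile[y][x] for y, x in range(8): nonnegative indices, in range under Pre_
def pvTileAt (tile : List (List Int)) (y x : Nat) : Int := (tile.getD y []).getD x 0

-- for y in range(8): for x in range(8): out[ty*8+y][tx*8+x] = tile[y][x]
def pvCopyTile (out : List (List Int)) (ty tx : Nat) (tile : List (List Int)) : List (List Int) :=
  (List.range 8).foldl (fun o y =>
    (List.range 8).foldl (fun o2 x => pvSetCell o2 (ty*8+y) (tx*8+x) (pvTileAt tile y x)) o) out

-- body of A's inner loop: tile = unique_tiles[idx]; the two conditional flips; the 8x8 copy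
def pvPlace (unique_tiles : List (List (List Int))) (out : List (List Int)) (ty tx : Nat)
    (t : Int × Bool × Bool) : List (List Int) :=
  let tile0 := (PySem.List.pyGet? unique_tiles t.1).getD []
  let tile1 := if t.2.1 then tile0.map List.reverse else tile0
  let tile2 := if t.2.2 then tile1.reverse else tile1
  pvCopyTile out ty tx tile2

def reconstruct_pixels_8x8_py (unique_tiles : List (List (List Int))) (placements : List (List (Int × Bool × Bool))) (width : Int) (height : Int) : List (List Int) :=
  -- out = [[0] * width for _ in range(height)]
  let out0 := List.replicate height.toNat (List.replicate width.toNat (0:Int))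
  (placements.zipIdx).foldl (fun out rt =>
    (rt.1.zipIdx).foldl (fun out pt => pvPlace unique_tiles out rt.2 pt.2 pt.1) out) out0

-- ===== PORT B =====
-- one output pixel, looked up through the computed flip coordinate map
def pvPixel (unique_tiles : List (List (List Int))) (placements : List (List (Int × Bool × Bool)))
    (r c : Nat) : Int :=
  match placements[r / 8]? with
  | none => 0
  | some row =>
    match row[c / 8]? with
    | none => 0
    | some (idx, hf, vf) =>
      let tile := (PySem.List.pyGet? unique_tiles idx).getD []
      (tile.getD (if vf then 7 - r % 8 else r % 8) []).getD (if hf then 7 - c % 8 else c % 8) 0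

def reconstruct_pixels_8x8_py_alt (unique_tiles : List (List (List Int))) (placements : List (List (Int × Bool × Bool))) (width : Int) (height : Int) : List (List Int) :=
  (List.range height.toNat).map (fun r =>
    (List.range width.toNat).map (fun c => pvPixel unique_tiles placements r c))

-- ===== PRECONDITION & SPEC =====
def pvTileOk (unique_tiles : List (List (List Int))) (idx : Int) : Bool :=
  match PySem.List.pyGet? unique_tiles idx with
  | some tile => tile.length == 8 && tile.all (fun r => r.length == 8)
  | none => false

-- Pre_ excludes the inputs on which A raises IndexError (a tile index beyond unique_tiles,
-- a grid too small for a placed tile, a referenced tile with fewer than 8 rows or columns)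
-- and, narrower than bare non-crashing, inputs with a referenced tile LARGER than 8x8: there
-- A returns, but a flipped oversize tile makes its flip-then-copy pick accidental trailing
-- rows/columns, an artefact of building reversed copies, while B reads the contract 8x8
-- coordinates (see the cite).
def Pre_reconstruct_pixels_8x8_py (unique_tiles : List (List (List Int))) (placements : List (List (Int × Bool × Bool))) (width : Int) (height : Int) : Prop :=
  ∀ p ∈ placements.zipIdx,
    (p.1 ≠ [] → 8 * ((p.2 : Int) + 1) ≤ height ∧ 8 * (p.1.length : Int) ≤ width) ∧
    (∀ q ∈ p.1, pvTileOk unique_tiles q.1 = true)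
instance (unique_tiles : List (List (List Int))) (placements : List (List (Int × Bool × Bool))) (width : Int) (height : Int) : Decidable (Pre_reconstruct_pixels_8x8_py unique_tiles placements width height) := by unfold Pre_reconstruct_pixels_8x8_py; infer_instance

def pvWitness_reconstruct_pixels_8x8_py : List (List (List Int)) × (List (List (Int × Bool × Bool))) × Int × Int :=
  ([[[0,1,2,3,4,5,6,7],[10,11,12,13,14,15,16,17],[20,21,22,23,24,25,26,27],[30,31,32,33,34,35,36,37],
     [40,41,42,43,44,45,46,47],[50,51,52,53,54,55,56,57],[60,61,62,63,64,65,66,67],[70,71,72,73,74,75,76,77]]],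
   [[(0, true, false)], [(0, false, true)]], 8, 16)

def Spec_reconstruct_pixels_8x8_py (unique_tiles : List (List (List Int))) (placements : List (List (Int × Bool × Bool))) (width : Int) (height : Int) (out : List (List Int)) : Prop := out = reconstruct_pixels_8x8_py_alt unique_tiles placements width height
instance (unique_tiles : List (List (List Int))) (placements : List (List (Int × Bool × Bool))) (width : Int) (height : Int) (out : List (List Int)) : Decidable (Spec_reconstruct_pixels_8x8_py unique_tiles placements width height out) := by unfold Spec_reconstruct_pixels_8x8_py; infer_instance

-- ===== CLAIM (what is proved, stated in full; the proofs are below) =====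
def Claim_equal_reconstruct_pixels_8x8_py : Prop := ∀ (unique_tiles : List (List (List Int))) (placements : List (List (Int × Bool × Bool))) (width : Int) (height : Int), Dom_reconstruct_pixels_8x8_py unique_tiles placements width height → Pre_reconstruct_pixels_8x8_py unique_tiles placements width height → Spec_reconstruct_pixels_8x8_py unique_tiles placements width height (reconstruct_pixels_8x8_py unique_tiles placements width height)

-- ===== LEMMAS AND PROOFS =====

def pvShape (o : List (List Int)) (H W : Nat) : Prop :=
  o.length = H ∧ ∀ row ∈ o, row.length = W

def pvGetCell (o : List (List Int)) (r c : Nat) : Int := (o.getD r []).getD c 0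

lemma shape_setCell {o : List (List Int)} {H W : Nat} (h : pvShape o H W) (r c : Nat) (v : Int) :
    pvShape (pvSetCell o r c v) H W := by
  obtain ⟨hl, hw⟩ := h
  by_cases hr : r < o.length
  · refine ⟨by simpa [pvSetCell] using hl, ?_⟩
    intro row hrow
    rcases List.mem_or_eq_of_mem_set hrow with hm | he
    · exact hw _ hm
    · subst he
      simp [List.getD, List.getElem?_eq_getElem hr]
      exact hw _ (List.getElem_mem hr)
  · rw [pvSetCell, List.set_eq_of_length_le (by omega)]
    exact ⟨hl, hw⟩

lemma get_setCell {o : List (List Int)} {H W : Nat} (h : pvShape o H W)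
    {r c : Nat} (hr : r < H) (hc : c < W) (v : Int) (r' c' : Nat) :
    pvGetCell (pvSetCell o r c v) r' c' =
      if r' = r ∧ c' = c then v else pvGetCell o r' c' := by
  obtain ⟨hl, hw⟩ := h
  subst hl
  have hcl : c < (o.getD r []).length := by
    rw [List.getD, List.getElem?_eq_getElem hr]
    simpa using (hw _ (List.getElem_mem hr)) ▸ hc
  by_cases h1 : r' = r
  · have hset : (pvSetCell o r c v)[r]? = some ((o.getD r []).set c v) := by
      rw [pvSetCell]; exact List.getElem?_set_self (by simpa using hr)
    subst h1
    by_cases h2 : c' = c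
    · subst h2
      simp only [pvGetCell, List.getD, hset, Option.getD_some]
      rw [List.getElem?_set_self (by simpa [List.getD] using hcl)]
      rfl
    · simp [pvGetCell, List.getD, hset, List.getElem?_set_ne (by omega : c ≠ c'), h2]
  · simp [pvGetCell, pvSetCell, List.getD, List.getElem?_set_ne (by omega : r ≠ r'), h1]

lemma foldX_shape (f : Nat → Int) (R tx n : Nat) {o : List (List Int)} {H W : Nat}
    (h : pvShape o H W) :
    pvShape ((List.range n).foldl (fun o2 x => pvSetCell o2 R (tx*8+x) (f x)) o) H W := by
  induction n generalizing o with
  | zero => simpa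
  | succ n ih => rw [List.range_succ, List.foldl_append]; exact shape_setCell (ih h) _ _ _

lemma foldX_get (f : Nat → Int) {o : List (List Int)} {H W : Nat} (h : pvShape o H W)
    {R tx n : Nat} (hR : R < H) (hn : tx*8+n ≤ W) (r' c' : Nat) :
    pvGetCell ((List.range n).foldl (fun o2 x => pvSetCell o2 R (tx*8+x) (f x)) o) r' c' =
      if r' = R ∧ tx*8 ≤ c' ∧ c' < tx*8+n then f (c' - tx*8) else pvGetCell o r' c' := by
  induction n generalizing o with
  | zero =>
    simp only [List.range_zero, List.foldl_nil]
    rw [if_neg (by omega)]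
  | succ n ih =>
    rw [show List.range (n+1) = List.range n ++ [n] from List.range_succ, List.foldl_append]
    simp only [List.foldl_cons, List.foldl_nil]
    rw [get_setCell (foldX_shape f R tx n h) hR (by omega) _ r' c',
        ih h (by omega)]
    by_cases hA : r' = R ∧ c' = tx * 8 + n
    · rw [if_pos hA, if_pos ⟨hA.1, by omega, by omega⟩]
      congr 1
      omega
    · rw [if_neg hA]
      by_cases hB : r' = R ∧ tx * 8 ≤ c' ∧ c' < tx * 8 + n
      · rw [if_pos hB, if_pos ⟨hB.1, hB.2.1, by omega⟩]
      · rw [if_neg hB, if_neg ?_]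
        rintro ⟨h1, h2, h3⟩
        by_cases hc : c' < tx * 8 + n
        · exact hB ⟨h1, h2, hc⟩
        · exact hA ⟨h1, by omega⟩

lemma foldY_shape (tile : List (List Int)) (ty tx m : Nat) {o : List (List Int)} {H W : Nat}
    (h : pvShape o H W) :
    pvShape ((List.range m).foldl (fun o y =>
      (List.range 8).foldl (fun o2 x => pvSetCell o2 (ty*8+y) (tx*8+x) (pvTileAt tile y x)) o) o) H W := by
  induction m generalizing o with
  | zero => simpa
  | succ m ih =>
    rw [show List.range (m+1) = List.range m ++ [m] from List.range_succ, List.foldl_append]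
    simp only [List.foldl_cons, List.foldl_nil]
    exact foldX_shape _ _ _ _ (ih h)

lemma foldY_get (tile : List (List Int)) {o : List (List Int)} {H W : Nat} (h : pvShape o H W)
    {ty tx m : Nat} (hm : m ≤ 8) (hY : ty*8+8 ≤ H) (hX : tx*8+8 ≤ W) (r' c' : Nat) :
    pvGetCell ((List.range m).foldl (fun o y =>
      (List.range 8).foldl (fun o2 x => pvSetCell o2 (ty*8+y) (tx*8+x) (pvTileAt tile y x)) o) o) r' c' =
      if ty*8 ≤ r' ∧ r' < ty*8+m ∧ tx*8 ≤ c' ∧ c' < tx*8+8 then pvTileAt tile (r' - ty*8) (c' - tx*8)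
      else pvGetCell o r' c' := by
  induction m generalizing o with
  | zero =>
    simp only [List.range_zero, List.foldl_nil]
    rw [if_neg (by omega)]
  | succ m ih =>
    rw [show List.range (m+1) = List.range m ++ [m] from List.range_succ, List.foldl_append]
    simp only [List.foldl_cons, List.foldl_nil]
    rw [foldX_get _ (foldY_shape tile ty tx m h) (by omega) (by omega) r' c',
        ih h (by omega)]
    by_cases hA : r' = ty * 8 + m ∧ tx * 8 ≤ c' ∧ c' < tx * 8 + 8
    · rw [if_pos hA, if_pos ⟨by omega, by omega, hA.2.1, hA.2.2⟩]
      have hm' : r' - ty * 8 = m := by omega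
      rw [hm']
    · rw [if_neg hA]
      by_cases hB : ty * 8 ≤ r' ∧ r' < ty * 8 + m ∧ tx * 8 ≤ c' ∧ c' < tx * 8 + 8
      · rw [if_pos hB, if_pos ⟨hB.1, by omega, hB.2.2.1, hB.2.2.2⟩]
      · rw [if_neg hB, if_neg ?_]
        rintro ⟨h1, h2, h3, h4⟩
        by_cases hr : r' < ty * 8 + m
        · exact hB ⟨h1, hr, h3, h4⟩
        · exact hA ⟨by omega, h3, h4⟩

lemma get_copyTile {o : List (List Int)} {H W : Nat} (h : pvShape o H W)
    {ty tx : Nat} (hY : ty*8+8 ≤ H) (hX : tx*8+8 ≤ W) (tile : List (List Int)) (r c : Nat) :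
    pvGetCell (pvCopyTile o ty tx tile) r c =
      if ty*8 ≤ r ∧ r < ty*8+8 ∧ tx*8 ≤ c ∧ c < tx*8+8 then pvTileAt tile (r - ty*8) (c - tx*8)
      else pvGetCell o r c := by
  exact foldY_get tile h (by omega) hY hX r c

lemma shape_copyTile {o : List (List Int)} {H W : Nat} (h : pvShape o H W) (ty tx : Nat)
    (tile : List (List Int)) : pvShape (pvCopyTile o ty tx tile) H W :=
  foldY_shape tile ty tx 8 h

def pvFlipTile (ut : List (List (List Int))) (t : Int × Bool × Bool) : List (List Int) :=
  let tile0 := (PySem.List.pyGet? ut t.1).getD []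
  let tile1 := if t.2.1 then tile0.map List.reverse else tile0
  if t.2.2 then tile1.reverse else tile1

lemma pvPlace_eq (ut : List (List (List Int))) (o : List (List Int)) (ty tx : Nat)
    (t : Int × Bool × Bool) : pvPlace ut o ty tx t = pvCopyTile o ty tx (pvFlipTile ut t) := rfl

lemma foldRow_shape (ut : List (List (List Int))) (ty : Nat) (row : List (Int × Bool × Bool))
    (j : Nat) {o : List (List Int)} {H W : Nat} (h : pvShape o H W) :
    pvShape ((row.zipIdx j).foldl (fun o pt => pvPlace ut o ty pt.2 pt.1) o) H W := by
  induction row generalizing j o with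
  | nil => simpa
  | cons t row ih =>
    rw [List.zipIdx_cons, List.foldl_cons]
    exact ih (j+1) (by rw [pvPlace_eq]; exact shape_copyTile h _ _ _)

lemma foldRow_get (ut : List (List (List Int))) (ty : Nat) (row : List (Int × Bool × Bool))
    (j : Nat) {o : List (List Int)} {H W : Nat} (h : pvShape o H W)
    (hH : row = [] ∨ ty*8+8 ≤ H) (hW : row = [] ∨ 8*(j + row.length) ≤ W) (r c : Nat) :
    pvGetCell ((row.zipIdx j).foldl (fun o pt => pvPlace ut o ty pt.2 pt.1) o) r c =
      if ty*8 ≤ r ∧ r < ty*8+8 ∧ j*8 ≤ c ∧ c < (j+row.length)*8 then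
        pvTileAt (pvFlipTile ut (row.getD (c/8 - j) (0, true, true))) (r % 8) (c % 8)
      else pvGetCell o r c := by
  induction row generalizing j o with
  | nil =>
    simp only [List.zipIdx_nil, List.foldl_nil, List.length_nil]
    rw [if_neg (by omega)]
  | cons t row ih =>
    have hH' : ty*8+8 ≤ H := by rcases hH with h' | h' <;> simp_all
    have hW' : 8*(j + (t :: row).length) ≤ W := by rcases hW with h' | h' <;> simp_all
    rw [List.zipIdx_cons, List.foldl_cons, pvPlace_eq,
        ih (j+1) (by exact shape_copyTile h _ _ _)
          (by by_cases hr : row = [] <;> [left; right] <;> simp_all)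
          (by by_cases hr : row = [] <;> [left; right] <;> [simp_all; (simp at hW' ⊢; omega)]),
        get_copyTile h hH' (by simp at hW'; omega) _ r c]
    by_cases hA : ty*8 ≤ r ∧ r < ty*8+8 ∧ (j+1)*8 ≤ c ∧ c < (j+1+row.length)*8
    · rw [if_pos hA, if_pos (by simp; omega)]
      have h1 : c/8 - j = (c/8 - (j+1)) + 1 := by omega
      rw [h1, List.getD_cons_succ]
    · rw [if_neg hA]
      by_cases hB : ty*8 ≤ r ∧ r < ty*8+8 ∧ j*8 ≤ c ∧ c < j*8+8
      · rw [if_pos (by simp; omega)]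
        have h1 : c/8 - j = 0 := by omega
        have h2 : r - ty*8 = r % 8 := by omega
        have h3 : c - j*8 = c % 8 := by omega
        rw [h1, List.getD_cons_zero, h2, h3]
        have hC : ty*8 ≤ r ∧ r < ty*8+8 ∧ j*8 ≤ c ∧ c < (j+(t :: row).length)*8 := by simp; omega
        rw [if_pos hC]
      · rw [if_neg hB, if_neg (by simp; omega)]

lemma foldAll_shape (ut : List (List (List Int))) (pls : List (List (Int × Bool × Bool)))
    (k : Nat) {o : List (List Int)} {H W : Nat} (h : pvShape o H W) :
    pvShape ((pls.zipIdx k).foldl (fun out rt =>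
      (rt.1.zipIdx).foldl (fun out pt => pvPlace ut out rt.2 pt.2 pt.1) out) o) H W := by
  induction pls generalizing k o with
  | nil => simpa
  | cons row pls ih =>
    rw [List.zipIdx_cons, List.foldl_cons]
    exact ih (k+1) (foldRow_shape ut k row 0 h)

lemma foldAll_get (ut : List (List (List Int))) (pls : List (List (Int × Bool × Bool)))
    (k : Nat) {o : List (List Int)} {H W : Nat} (h : pvShape o H W)
    (hPre : ∀ p ∈ pls.zipIdx k, p.1 ≠ [] → 8*(p.2+1) ≤ H ∧ 8*p.1.length ≤ W) (r c : Nat) :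
    pvGetCell ((pls.zipIdx k).foldl (fun out rt =>
      (rt.1.zipIdx).foldl (fun out pt => pvPlace ut out rt.2 pt.2 pt.1) out) o) r c =
      if k ≤ r/8 ∧ r/8 < k + pls.length ∧ c/8 < (pls.getD (r/8 - k) []).length then
        pvTileAt (pvFlipTile ut ((pls.getD (r/8 - k) []).getD (c/8) (0, true, true))) (r % 8) (c % 8)
      else pvGetCell o r c := by
  induction pls generalizing k o with
  | nil =>
    simp only [List.zipIdx_nil, List.foldl_nil, List.length_nil]
    rw [if_neg (by omega)]
  | cons row pls ih =>
    rw [List.zipIdx_cons, List.foldl_cons,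
        ih (k+1) (foldRow_shape ut k row 0 h)
          (fun p hp hne => hPre p (by rw [List.zipIdx_cons]; exact List.mem_cons_of_mem _ hp) hne)]
    by_cases hA : k+1 ≤ r/8 ∧ r/8 < k+1 + pls.length ∧ c/8 < (pls.getD (r/8 - (k+1)) []).length
    · have h1 : r/8 - k = (r/8 - (k+1)) + 1 := by omega
      have hC : k ≤ r/8 ∧ r/8 < k + (row :: pls).length ∧ c/8 < ((row :: pls).getD (r/8 - k) []).length := by
        rw [h1, List.getD_cons_succ]
        exact ⟨by omega, by simp; omega, hA.2.2⟩
      rw [if_pos hA, if_pos hC, h1, List.getD_cons_succ]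
    · rw [if_neg hA]
      by_cases hrow : row = []
      · subst hrow
        rw [foldRow_get ut k [] 0 h (Or.inl rfl) (Or.inl rfl) r c, if_neg (by simp)]
        by_cases hk : r/8 = k
        · rw [if_neg (by rw [hk]; simp)]
        · rw [if_neg ?_]
          rintro ⟨hk1, hk2, hk3⟩
          have h1 : r/8 - k = (r/8 - (k+1)) + 1 := by omega
          rw [h1, List.getD_cons_succ] at hk3
          exact hA ⟨by omega, by simp at hk2; omega, hk3⟩
      · obtain ⟨hH', hW'⟩ := hPre (row, k) (by rw [List.zipIdx_cons]; exact List.mem_cons_self) hrow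
        simp only [] at hH' hW'
        rw [foldRow_get ut k row 0 h (Or.inr (by omega)) (Or.inr (by omega)) r c]
        by_cases hB : k*8 ≤ r ∧ r < k*8+8 ∧ 0*8 ≤ c ∧ c < (0+row.length)*8
        · have hk : r/8 = k := by omega
          rw [if_pos hB, if_pos (by rw [hk]; simp; omega)]
          rw [hk, Nat.sub_self, List.getD_cons_zero]
          simp
        · rw [if_neg hB, if_neg ?_]
          rintro ⟨hk1, hk2, hk3⟩
          by_cases hk : r/8 = k
          · rw [hk, Nat.sub_self, List.getD_cons_zero] at hk3
            exact hB ⟨by omega, by omega, by omega, by omega⟩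
          · have h1 : r/8 - k = (r/8 - (k+1)) + 1 := by omega
            rw [h1, List.getD_cons_succ] at hk3
            exact hA ⟨by omega, by simp at hk2; omega, hk3⟩

lemma getD_rev {α : Type} (l : List α) (d : α) (i : Nat) (h : i < l.length) :
    l.reverse.getD i d = l.getD (l.length - 1 - i) d := by
  rw [List.getD_eq_getElem?_getD, List.getD_eq_getElem?_getD, List.getElem?_reverse h]

lemma getD_map' (l : List (List Int)) (i : Nat) (h : i < l.length) :
    (l.map List.reverse).getD i [] = (l.getD i []).reverse := by
  rw [List.getD_eq_getElem?_getD, List.getD_eq_getElem?_getD, List.getElem?_map,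
      List.getElem?_eq_getElem h]
  rfl

lemma getD_len (tile : List (List Int)) (hrow : ∀ rw ∈ tile, rw.length = 8)
    (j : Nat) (hj : j < tile.length) : (tile.getD j []).length = 8 := by
  rw [List.getD_eq_getElem?_getD, List.getElem?_eq_getElem hj]
  exact hrow _ (List.getElem_mem hj)

lemma flip_at {tile : List (List Int)} (h8 : tile.length = 8)
    (hrow : ∀ rw ∈ tile, rw.length = 8) {y x : Nat} (hy : y < 8) (hx : x < 8) (hf vf : Bool) :
    pvTileAt (if vf then (if hf then tile.map List.reverse else tile).reverse
              else (if hf then tile.map List.reverse else tile)) y x =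
      (tile.getD (if vf then 7 - y else y) []).getD (if hf then 7 - x else x) 0 := by
  have hyl : y < tile.length := by omega
  have hyl' : 7 - y < tile.length := by omega
  cases vf <;> cases hf <;> simp only [if_true, if_false, Bool.false_eq_true]
  · rfl
  · -- vf = false, hf = true
    rw [pvTileAt, getD_map' tile y hyl, getD_rev _ _ _ (by rw [getD_len tile hrow y hyl]; omega),
        getD_len tile hrow y hyl]
  · -- vf = true, hf = false
    rw [pvTileAt, getD_rev tile _ _ hyl, h8]
  · -- vf = true, hf = true
    rw [pvTileAt, getD_rev (tile.map List.reverse) _ _ (by simpa using hyl),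
        List.length_map, h8, getD_map' tile (7-y) hyl',
        getD_rev _ _ _ (by rw [getD_len tile hrow _ hyl']; omega),
        getD_len tile hrow _ hyl']

lemma shape_out0 (H W : Nat) :
    pvShape (List.replicate H (List.replicate W (0:Int))) H W := by
  refine ⟨by simp, fun row h => ?_⟩
  rw [List.eq_of_mem_replicate h]
  simp

lemma get_out0 (H W r c : Nat) :
    pvGetCell (List.replicate H (List.replicate W (0:Int))) r c = 0 := by
  simp [pvGetCell, List.getD, List.getElem?_replicate]
  split_ifs <;> simp

lemma cell_eq (ut : List (List (List Int))) (pls : List (List (Int × Bool × Bool)))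
    (hPre2 : ∀ row ∈ pls, ∀ q ∈ row, pvTileOk ut q.1 = true) (r c : Nat) :
    (if 0 ≤ r/8 ∧ r/8 < 0 + pls.length ∧ c/8 < (pls.getD (r/8 - 0) []).length then
       pvTileAt (pvFlipTile ut ((pls.getD (r/8 - 0) []).getD (c/8) (0, true, true))) (r % 8) (c % 8)
     else 0) = pvPixel ut pls r c := by
  simp only [Nat.sub_zero, Nat.zero_add, Nat.zero_le, true_and]
  by_cases h1 : r/8 < pls.length
  · have hrow : pls[r/8]? = some (pls.getD (r/8) []) := by
      rw [List.getD_eq_getElem _ _ h1, List.getElem?_eq_getElem h1]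
    rw [pvPixel, hrow]
    dsimp only
    by_cases h2 : c/8 < (pls.getD (r/8) []).length
    · have ht : (pls.getD (r/8) [])[c/8]? = some ((pls.getD (r/8) []).getD (c/8) (0, true, true)) := by
        rw [List.getD_eq_getElem _ _ h2, List.getElem?_eq_getElem h2]
      have hmem : (pls.getD (r/8) []).getD (c/8) (0, true, true) ∈ pls.getD (r/8) [] := by
        rw [List.getD_eq_getElem _ _ h2]
        exact List.getElem_mem h2
      have hrowmem : pls.getD (r/8) [] ∈ pls := by
        rw [List.getD_eq_getElem _ _ h1]
        exact List.getElem_mem h1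
      rcases hteq : (pls.getD (r/8) []).getD (c/8) (0, true, true) with ⟨idx, hf, vf⟩
      rw [hteq] at hmem
      rw [ht, hteq]
      dsimp only
      have hok := hPre2 _ hrowmem _ hmem
      unfold pvTileOk at hok
      rcases hget : PySem.List.pyGet? ut idx with _ | tile
      · rw [hget] at hok
        simp at hok
      · rw [hget] at hok
        simp only [Bool.and_eq_true, beq_iff_eq, List.all_eq_true] at hok
        obtain ⟨hlen, hrows⟩ := hok
        have hrows' : ∀ rw ∈ tile, rw.length = 8 := fun rw h => by
          have := hrows rw h
          simpa using this
        rw [if_pos ⟨h1, h2⟩]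
        simp only [pvFlipTile, hget, Option.getD_some]
        exact flip_at hlen hrows' (Nat.mod_lt _ (by omega)) (Nat.mod_lt _ (by omega)) hf vf
    · rw [List.getElem?_eq_none (by omega), if_neg (by omega)]
  · rw [pvPixel, List.getElem?_eq_none (by omega), if_neg (by omega)]


lemma shape_A (ut : List (List (List Int))) (pls : List (List (Int × Bool × Bool))) (H W : Nat) :
    pvShape ((pls.zipIdx 0).foldl (fun out rt =>
      (rt.1.zipIdx).foldl (fun out pt => pvPlace ut out rt.2 pt.2 pt.1) out)
      (List.replicate H (List.replicate W (0:Int)))) H W :=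
  foldAll_shape ut pls 0 (shape_out0 H W)

-- ===== VERDICT (by name: the statement is the Claim_ definition above) =====
theorem reconstruct_pixels_8x8_py_spec : Claim_equal_reconstruct_pixels_8x8_py := by
  unfold Claim_equal_reconstruct_pixels_8x8_py
  intro ut pls width height _ hPre
  unfold Spec_reconstruct_pixels_8x8_py reconstruct_pixels_8x8_py reconstruct_pixels_8x8_py_alt
  dsimp only
  have hPreN : ∀ p ∈ pls.zipIdx 0, p.1 ≠ [] →
      8*(p.2+1) ≤ height.toNat ∧ 8*p.1.length ≤ width.toNat := by
    intro p hp hne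
    obtain ⟨hb1, hb2⟩ := (hPre p hp).1 hne
    exact ⟨by omega, by omega⟩
  have hPre2 : ∀ row ∈ pls, ∀ q ∈ row, pvTileOk ut q.1 = true := by
    intro row hrow q hq
    obtain ⟨i, hi, hieq⟩ := List.getElem_of_mem hrow
    have hmem : (pls[i], 0 + i) ∈ pls.zipIdx 0 := by
      rw [← List.getElem_zipIdx (by simpa using hi)]
      exact List.getElem_mem _
    rw [hieq, Nat.zero_add] at hmem
    exact (hPre _ hmem).2 q hq
  have hSh := shape_A ut pls height.toNat width.toNat
  refine List.ext_getElem (by simpa using hSh.1) ?_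
  intro r h1 h2
  have hr : r < height.toNat := by simpa using h2
  have hrowA : ∀ h', (((pls.zipIdx 0).foldl (fun out rt =>
      (rt.1.zipIdx).foldl (fun out pt => pvPlace ut out rt.2 pt.2 pt.1) out)
      (List.replicate height.toNat (List.replicate width.toNat (0:Int))))[r]'h').length = width.toNat :=
    fun h' => hSh.2 _ (List.getElem_mem h')
  refine List.ext_getElem (by simp [hrowA]) ?_
  intro c hc1 hc2
  have hA : ∀ (o : List (List Int)) hx hy, o.length = height.toNat →
      (∀ row ∈ o, row.length = width.toNat) → (o[r]'hx)[c]'hy = pvGetCell o r c := by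
    intro o hx hy hl hw
    rw [pvGetCell, List.getD_eq_getElem _ _ hx, List.getD_eq_getElem _ _ hy]
  rw [hA _ h1 hc1 hSh.1 hSh.2,
      foldAll_get ut pls 0 (shape_out0 _ _) hPreN r c, get_out0,
      cell_eq ut pls hPre2 r c]
  simp [List.getElem_map, List.getElem_range]
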